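-- pv_equiv track=rewrite | github.com/yowatanabe/learn-to-code | python/418/main.py | longest_error_streak
-- ===== SOURCE A (Python) =====
-- def longest_error_streak(statuses):
--     left = 0
--     ok_count = 0
--     max_length = 0
--
--     for right in range(len(statuses)):
--         if statuses[right] == "ok":
--             ok_count += 1
--
--         # "ok" を2個以上含む場合は、条件を満たすまで左を縮める
--         while ok_count > 1:
--             if statuses[left] == "ok":
--                 ok_count -= 1
--             left += 1
--
--         # 現在の区間は「最大1個の ok を含む区間」
--         max_length = max(max_length, right - left + 1)
--
--     return max_length
-- ===== SOURCE B (Python) =====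
-- def longest_error_streak(statuses):
--     best = 0
--     cur = 0    # length of the longest window ending here containing at most one "ok"
--     prev = 0   # length of the current trailing streak of non-"ok" entries
--     for s in statuses:
--         if s == "ok":
--             cur = prev + 1
--             prev = 0
--         else:
--             cur += 1
--             prev += 1
--         if cur > best:
--             best = cur
--     return best
-- ===== Notes on version B (the rewrite author's own statement) =====
-- stated objective: simpler
-- what changed: Replaced the two-pointer sliding window (left index, ok counter, inner shrinking while-loop, list indexing) by a single fold over the elements carrying two streak counters (window length ending here with at most one 'ok', and trailing non-'ok' streak), with no indexing and no inner loop.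
import Mathlib
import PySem

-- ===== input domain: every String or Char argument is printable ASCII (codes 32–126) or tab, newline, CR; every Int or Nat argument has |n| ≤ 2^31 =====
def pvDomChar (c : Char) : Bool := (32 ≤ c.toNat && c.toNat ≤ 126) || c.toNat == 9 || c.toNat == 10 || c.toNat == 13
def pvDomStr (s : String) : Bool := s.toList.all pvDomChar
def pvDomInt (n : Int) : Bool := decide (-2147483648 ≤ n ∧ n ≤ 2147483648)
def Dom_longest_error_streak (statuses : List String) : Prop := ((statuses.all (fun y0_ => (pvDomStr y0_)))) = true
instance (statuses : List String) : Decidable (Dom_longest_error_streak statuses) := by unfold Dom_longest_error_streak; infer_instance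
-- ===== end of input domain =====

-- B replaces A's two-pointer sliding window (left index, inner shrinking while-loop,
-- list indexing) by a single fold carrying two streak counters; objective: simpler.

-- ===== PORT A =====
-- the inner `while ok_count > 1` loop; fuel = len(statuses) bounds the advance of `left`.
-- statuses[left] is read with pyGetD "" : in every state Python reaches, left is in range
-- (the window still contains an "ok"), so the default is never the value Python sees.
def shrinkA (xs : List String) : Nat → Int → Int → Int × Int
  | 0, l, okc => (l, okc)
  | fuel+1, l, okc =>
    if 1 < okc then
      shrinkA xs fuel (l + 1) (if PySem.List.pyGetD xs l "" = "ok" then okc - 1 else okc)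
    else (l, okc)

-- one iteration of `for right in range(len(statuses))`; state = (left, ok_count, max_length)
def stepA (xs : List String) (s : Int × Int × Int) (right : Int) : Int × Int × Int :=
  let okc := if PySem.List.pyGetD xs right "" = "ok" then s.2.1 + 1 else s.2.1
  let ls := shrinkA xs xs.length s.1 okc
  (ls.1, ls.2, max s.2.2 (right - ls.1 + 1))

def longest_error_streak (statuses : List String) : Int :=
  ((PySem.List.pyRange 0 statuses.length 1).foldl (stepA statuses) (0, 0, 0)).2.2

-- ===== PORT B =====
-- state = (best, cur, prev): cur = longest window ending here with at most one "ok",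
-- prev = trailing streak of non-"ok" entries
def stepB (s : Int × Int × Int) (x : String) : Int × Int × Int :=
  let cur := if x = "ok" then s.2.2 + 1 else s.2.1 + 1
  let prev := if x = "ok" then 0 else s.2.2 + 1
  (if cur > s.1 then cur else s.1, cur, prev)

def longest_error_streak_alt (statuses : List String) : Int :=
  (statuses.foldl stepB (0, 0, 0)).1

-- ===== PRECONDITION & SPEC =====
def Spec_longest_error_streak (statuses : List String) (out : Int) : Prop := out = longest_error_streak_alt statuses
instance (statuses : List String) (out : Int) : Decidable (Spec_longest_error_streak statuses out) := by unfold Spec_longest_error_streak; infer_instance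

-- ===== CLAIM (what is proved, stated in full; the proofs are below) =====
def Claim_equal_longest_error_streak : Prop := ∀ (statuses : List String), Dom_longest_error_streak statuses → Spec_longest_error_streak statuses (longest_error_streak statuses)

-- ===== LEMMAS AND PROOFS =====

-- Invariant after processing the first r elements: A-state (l, k, m), B-state (b, c, p).
def InvLES (xs : List String) (r : Nat) (l k m b c p : Int) : Prop :=
  m = b ∧ l = (r : Int) - c ∧ 0 ≤ c ∧ c ≤ (r : Int) ∧ 0 ≤ p ∧ p ≤ c ∧
  k = (if p < c then 1 else 0) ∧
  (∀ i : Int, (r : Int) - c ≤ i → i < (r : Int) → i ≠ (r : Int) - 1 - p →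
      PySem.List.pyGetD xs i "" ≠ "ok") ∧
  (p < c → PySem.List.pyGetD xs ((r : Int) - 1 - p) "" = "ok")

lemma shrinkA_noop (xs : List String) (fuel : Nat) (l okc : Int) (h : ¬ 1 < okc) :
    shrinkA xs fuel l okc = (l, okc) := by
  cases fuel <;> simp [shrinkA, h]

lemma shrinkA_run (xs : List String) (q : Int)
    (hok : PySem.List.pyGetD xs q "" = "ok") :
    ∀ (fuel : Nat) (l : Int), l ≤ q → q + 1 - l ≤ (fuel : Int) →
    (∀ i : Int, l ≤ i → i < q → PySem.List.pyGetD xs i "" ≠ "ok") →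
    shrinkA xs fuel l 2 = (q + 1, 1) := by
  intro fuel
  induction fuel with
  | zero => intro l hlq hf _; exfalso; simp at hf; omega
  | succ n ih =>
    intro l hlq hf hno
    rcases eq_or_lt_of_le hlq with heq | hlt
    · subst heq
      simp only [shrinkA, if_pos (by norm_num : (1 : Int) < 2), hok]
      norm_num [shrinkA_noop]
    · have hne : PySem.List.pyGetD xs l "" ≠ "ok" := hno l le_rfl hlt
      simp only [shrinkA, if_pos (by norm_num : (1:Int) < 2), if_neg hne]
      exact ih (l + 1) (by omega) (by push_cast at hf ⊢; omega)
        (fun i h1 h2 => hno i (by omega) h2)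

lemma inv_fold (xs : List String) : ∀ r : Nat, r ≤ xs.length →
    InvLES xs r
      (((PySem.List.pyRange 0 r 1).foldl (stepA xs) (0, 0, 0)).1)
      (((PySem.List.pyRange 0 r 1).foldl (stepA xs) (0, 0, 0)).2.1)
      (((PySem.List.pyRange 0 r 1).foldl (stepA xs) (0, 0, 0)).2.2)
      (((xs.take r).foldl stepB (0, 0, 0)).1)
      (((xs.take r).foldl stepB (0, 0, 0)).2.1)
      (((xs.take r).foldl stepB (0, 0, 0)).2.2) := by
  intro r
  induction r with
  | zero =>
    intro _
    simp [PySem.List.pyRange_one_eq_nil (by omega : (0:Int) ≤ 0), InvLES]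
    intro i h1 h2; omega
  | succ r ih =>
    intro hr
    have hrn : r < xs.length := by omega
    have hA : PySem.List.pyRange 0 ((r + 1 : Nat) : Int) 1
        = PySem.List.pyRange 0 (r : Nat) 1 ++ [(r : Int)] := by
      push_cast
      exact PySem.List.pyRange_one_succ_right (by exact_mod_cast Nat.zero_le r)
    have hB : xs.take (r + 1) = xs.take r ++ [xs[r]] := by
      rw [List.take_add_one]; simp [List.getElem?_eq_getElem hrn]
    obtain ⟨hm, hl, hc0, hcr, hp0, hpc, hk, hwin, hokp⟩ := ih (by omega)
    set sA := (PySem.List.pyRange 0 (r : Nat) 1).foldl (stepA xs) (0, 0, 0) with hsA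
    set sB := (xs.take r).foldl stepB (0, 0, 0) with hsB
    have hget : PySem.List.pyGetD xs ((r : Nat) : Int) "" = xs[r] := by
      simp [List.getD_eq_getElem?_getD, List.getElem?_eq_getElem hrn]
    rw [hA, hB, List.foldl_append, List.foldl_append, List.foldl_cons, List.foldl_nil,
      List.foldl_cons, List.foldl_nil, ← hsA, ← hsB]
    by_cases hx : xs[r] = "ok"
    · have hstepB : stepB sB xs[r]
          = (if sB.2.2 + 1 > sB.1 then sB.2.2 + 1 else sB.1, sB.2.2 + 1, 0) := by
        simp [stepB, hx]
      by_cases hpc' : sB.2.2 < sB.2.1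
      · -- second "ok" enters the window: the shrink loop runs
        have hk1 : sA.2.1 = 1 := by rw [hk, if_pos hpc']
        set q : Int := (r : Int) - 1 - sB.2.2 with hqdef
        have hq : PySem.List.pyGetD xs q "" = "ok" := hokp hpc'
        have hshr : shrinkA xs xs.length sA.1 2 = (q + 1, 1) := by
          apply shrinkA_run xs q hq _ _ (by omega) (by omega)
          intro i h1 h2
          exact hwin i (by omega) (by omega) (by omega)
        have hstep : stepA xs sA ((r : Nat) : Int)
            = (q + 1, 1, max sA.2.2 ((r : Int) - (q + 1) + 1)) := by
          simp only [stepA, hget]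
          rw [if_pos hx, show sA.2.1 + 1 = (2 : Int) by omega, hshr]
        rw [hstep, hstepB]
        dsimp only
        refine ⟨?_, by push_cast; omega, by omega, by push_cast; omega,
          le_rfl, by omega, by simp; omega, ?_, ?_⟩
        · simp only [hm, max_def]; split_ifs <;> omega
        · intro i h1 h2 h3
          push_cast at h1 h2 h3
          exact hwin i (by omega) (by omega) (by omega)
        · intro _
          have he : ((r + 1 : Nat) : Int) - 1 - 0 = ((r : Nat) : Int) := by push_cast; omega
          rw [he, hget]; exact hx
      · -- first "ok" in the window: ok_count becomes 1, no shrink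
        have hk0 : sA.2.1 = 0 := by rw [hk, if_neg hpc']
        have hpceq : sB.2.2 = sB.2.1 := by omega
        have hstep : stepA xs sA ((r : Nat) : Int)
            = (sA.1, 1, max sA.2.2 ((r : Int) - sA.1 + 1)) := by
          simp only [stepA, hget]
          rw [if_pos hx, hk0, shrinkA_noop _ _ _ _ (by norm_num)]
          norm_num
        rw [hstep, hstepB]
        dsimp only
        refine ⟨?_, by push_cast; omega, by omega, by push_cast; omega,
          le_rfl, by omega, by simp; omega, ?_, ?_⟩
        · simp only [hm, max_def]; split_ifs <;> omega
        · intro i h1 h2 h3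
          push_cast at h1 h2 h3
          exact hwin i (by omega) (by omega) (by omega)
        · intro _
          have he : ((r + 1 : Nat) : Int) - 1 - 0 = ((r : Nat) : Int) := by push_cast; omega
          rw [he, hget]; exact hx
    · -- non-"ok" element: window just grows
      have hkle : ¬ 1 < sA.2.1 := by rw [hk]; split_ifs <;> norm_num
      have hstep : stepA xs sA ((r : Nat) : Int)
          = (sA.1, sA.2.1, max sA.2.2 ((r : Int) - sA.1 + 1)) := by
        simp only [stepA, hget]
        rw [if_neg hx, shrinkA_noop _ _ _ _ hkle]
      have hstepB : stepB sB xs[r]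
          = (if sB.2.1 + 1 > sB.1 then sB.2.1 + 1 else sB.1, sB.2.1 + 1, sB.2.2 + 1) := by
        simp [stepB, hx]
      rw [hstep, hstepB]
      dsimp only
      refine ⟨?_, by push_cast; omega, by omega, by push_cast; omega,
        by omega, by omega, ?_, ?_, ?_⟩
      · simp only [hm, hl, max_def]; split_ifs <;> omega
      · rw [hk]; split_ifs <;> first | rfl | omega
      · intro i h1 h2 h3
        push_cast at h1 h2 h3
        rcases lt_or_ge i (r : Int) with h | h
        · exact hwin i (by omega) h (by omega)
        · have hi : i = ((r : Nat) : Int) := by omega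
          rw [hi, hget]; exact hx
      · intro h
        have he : ((r + 1 : Nat) : Int) - 1 - (sB.2.2 + 1) = ((r : Nat) : Int) - 1 - sB.2.2 := by
          push_cast; omega
        rw [he]; exact hokp (by omega)

-- ===== VERDICT (by name: the statement is the Claim_ definition above) =====
theorem longest_error_streak_spec : Claim_equal_longest_error_streak := by
  intro statuses _
  unfold Spec_longest_error_streak longest_error_streak longest_error_streak_alt
  have h := inv_fold statuses statuses.length le_rfl
  rw [List.take_length] at h
  simpa using h.1
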